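-- pv_equiv track=rewrite | github.com/23adrian2300/WDI-AGH | Zestaw 3/Zestaw 3.py | thesame
-- ===== SOURCE A (Python) =====
-- def thesame(a, b):
--     num = [0] * 10
--     while a != 0:
--         num[a % 10] += 1
--         a //= 10
--     while b != 0:
--         num[b % 10] -= 1
--         b //= 10
--     for i in range(10):
--         if num[i] != 0:
--             return False
--     return True
-- ===== SOURCE B (Python) =====
-- def thesame(a, b):
--     da = []
--     while a != 0:
--         da.append(a % 10)
--         a //= 10
--     db = []
--     while b != 0:
--         db.append(b % 10)
--         b //= 10
--     return sorted(da) == sorted(db)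
-- ===== Notes on version B (the rewrite author's own statement) =====
-- stated objective: simpler
-- what changed: Collects each number's digits into a list and compares the sorted digit lists, instead of incrementing/decrementing a shared 10-slot count array and scanning it for non-zero entries.
import Mathlib
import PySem

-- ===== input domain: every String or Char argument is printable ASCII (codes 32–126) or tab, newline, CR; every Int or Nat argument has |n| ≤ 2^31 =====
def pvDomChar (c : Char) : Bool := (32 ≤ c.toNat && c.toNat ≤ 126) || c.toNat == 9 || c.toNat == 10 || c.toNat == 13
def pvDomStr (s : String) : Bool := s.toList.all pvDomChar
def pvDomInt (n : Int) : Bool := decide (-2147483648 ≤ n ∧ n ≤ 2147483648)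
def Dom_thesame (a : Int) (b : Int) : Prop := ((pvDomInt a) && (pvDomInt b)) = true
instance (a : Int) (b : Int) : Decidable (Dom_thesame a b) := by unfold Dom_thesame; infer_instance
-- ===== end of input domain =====

-- B compares the two sorted digit lists instead of A's shared 10-slot tally array;
-- both keep Python's while-loops, which never terminate for a negative argument, so Pre_ restricts to a, b ≥ 0.


-- ===== PORT A =====
-- 'while a != 0: num[a % 10] += 1; a //= 10' — exact for a ≥ 0 (Pre_), where Python's
-- //, % coincide with Nat division/mod; num[i] += δ ported as set/getD (index a%10 < 10 always in range).
def thesameLoop (delta : Int) (a : Nat) (num : List Int) : List Int :=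
  if h : a = 0 then num
  else thesameLoop delta (a / 10) (num.set (a % 10) (num.getD (a % 10) 0 + delta))
termination_by a
decreasing_by exact Nat.div_lt_self (Nat.pos_of_ne_zero h) (by norm_num)

def thesame (a : Int) (b : Int) : Bool :=
  let num := List.replicate 10 (0 : Int)
  let num := thesameLoop 1 a.toNat num
  let num := thesameLoop (-1) b.toNat num
  (List.range 10).all (fun i => num.getD i 0 == 0)

-- ===== PORT B =====
-- 'da = []; while a != 0: da.append(a % 10); a //= 10' — same digit order (least significant first); exact for a ≥ 0.
def altDigits (a : Nat) : List Int :=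
  if h : a = 0 then []
  else ((a % 10 : Nat) : Int) :: altDigits (a / 10)
termination_by a
decreasing_by exact Nat.div_lt_self (Nat.pos_of_ne_zero h) (by norm_num)

def thesame_alt (a : Int) (b : Int) : Bool :=
  PySem.List.sorted (altDigits a.toNat) (fun x => x) false
    == PySem.List.sorted (altDigits b.toNat) (fun x => x) false

-- ===== PRECONDITION & SPEC =====
-- Pre_ excludes negative arguments: there Python's 'a //= 10' stabilises at -1 and both while-loops never terminate.
def Pre_thesame (a : Int) (b : Int) : Prop := 0 ≤ a ∧ 0 ≤ b
instance (a : Int) (b : Int) : Decidable (Pre_thesame a b) := by unfold Pre_thesame; infer_instance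
def pvWitness_thesame : Int × Int := (120, 210)

def Spec_thesame (a : Int) (b : Int) (out : Bool) : Prop := out = thesame_alt a b
instance (a : Int) (b : Int) (out : Bool) : Decidable (Spec_thesame a b out) := by unfold Spec_thesame; infer_instance

-- ===== CLAIM (what is proved, stated in full; the proofs are below) =====
def Claim_equal_thesame : Prop := ∀ (a : Int) (b : Int), Dom_thesame a b → Pre_thesame a b → Spec_thesame a b (thesame a b)

-- ===== LEMMAS AND PROOFS =====

lemma altDigits_ne {a : Nat} (h : a ≠ 0) :
    altDigits a = ((a % 10 : Nat) : Int) :: altDigits (a / 10) := by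
  rw [altDigits]; exact dif_neg h

lemma altDigits_mem (a : Nat) : ∀ x ∈ altDigits a, 0 ≤ x ∧ x < 10 := by
  induction a using Nat.strong_induction_on with
  | _ a ih =>
    by_cases h : a = 0
    · subst h; simp [altDigits]
    · rw [altDigits_ne h]
      intro x hx
      rcases List.mem_cons.mp hx with h1 | h2
      · subst h1
        exact ⟨Int.natCast_nonneg _, by exact_mod_cast Nat.mod_lt a (by norm_num)⟩
      · exact ih (a / 10) (Nat.div_lt_self (Nat.pos_of_ne_zero h) (by norm_num)) x h2

lemma thesameLoop_length (delta : Int) (a : Nat) (num : List Int) :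
    (thesameLoop delta a num).length = num.length := by
  fun_induction thesameLoop delta a num with
  | case1 => rfl
  | case2 a num h ih => simpa using ih

lemma thesameLoop_getD (delta : Int) (a : Nat) (num : List Int) (hlen : num.length = 10)
    (i : Nat) (hi : i < 10) :
    (thesameLoop delta a num).getD i 0
      = num.getD i 0 + delta * ((altDigits a).count (i : Int)) := by
  fun_induction thesameLoop delta a num with
  | case1 =>
    simp [altDigits]
  | case2 a num h ih =>
    rw [ih (by simpa using hlen), altDigits_ne h]
    simp only [List.getD, List.getElem?_set, List.count_cons, beq_iff_eq, Nat.cast_inj]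
    by_cases hcase : a % 10 = i
    · simp only [hcase, if_pos, hlen, hi, Option.getD_some]
      push_cast
      ring
    · simp only [hcase, if_neg, not_false_iff]
      push_cast
      ring

lemma thesame_eq_counts (a b : Nat) :
    thesame (a : Int) (b : Int)
      = decide (∀ i : Nat, i < 10 →
          (altDigits a).count (i : Int) = (altDigits b).count (i : Int)) := by
  have key : ∀ i : Nat, i < 10 →
      (thesameLoop (-1) b (thesameLoop 1 a (List.replicate 10 (0 : Int)))).getD i 0
        = ((altDigits a).count (i : Int) : Int) - ((altDigits b).count (i : Int) : Int) := by
    intro i hi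
    rw [thesameLoop_getD _ _ _ (by rw [thesameLoop_length]; simp) i hi,
        thesameLoop_getD _ _ _ (by simp) i hi]
    have h0 : (List.replicate 10 (0 : Int)).getD i 0 = 0 := by
      simp only [List.getD, List.getElem?_replicate]
      simp [hi]
    rw [h0]; ring
  unfold thesame
  simp only [Int.toNat_natCast]
  rw [Bool.eq_iff_iff]
  simp only [List.all_eq_true, List.mem_range, decide_eq_true_eq, beq_iff_eq]
  constructor
  · intro h i hi
    have := h i hi
    rw [key i hi] at this
    omega
  · intro h i hi
    rw [key i hi, h i hi]
    ring

lemma counts_iff_perm (a b : Nat) :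
    (∀ i : Nat, i < 10 → (altDigits a).count (i : Int) = (altDigits b).count (i : Int))
      ↔ (altDigits a).Perm (altDigits b) := by
  rw [List.perm_iff_count]
  constructor
  · intro h x
    by_cases hx : 0 ≤ x ∧ x < 10
    · have hx' : x = ((x.toNat : Nat) : Int) := by omega
      rw [hx']
      exact h x.toNat (by omega)
    · rw [List.count_eq_zero_of_not_mem (fun hm => hx (altDigits_mem _ _ hm)),
          List.count_eq_zero_of_not_mem (fun hm => hx (altDigits_mem _ _ hm))]
  · intro h i _
    exact h (i : Int)

-- ===== VERDICT (by name: the statement is the Claim_ definition above) =====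
theorem thesame_spec : Claim_equal_thesame := by
  intro a b _ hpre
  unfold Spec_thesame thesame_alt
  obtain ⟨ha, hb⟩ := hpre
  obtain ⟨a', rfl⟩ := Int.eq_ofNat_of_zero_le ha
  obtain ⟨b', rfl⟩ := Int.eq_ofNat_of_zero_le hb
  rw [thesame_eq_counts a' b']
  simp only [Int.toNat_natCast]
  rw [Bool.eq_iff_iff]
  simp only [decide_eq_true_eq, beq_iff_eq,
    PySem.List.sorted_id_eq_sorted_id_iff_perm]
  exact counts_iff_perm a' b'
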